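-- pv_equiv track=rewrite | github.com/SpM-lab/pySpMAC | src/spmac/util.py | dict_with_lowerkey
-- ===== SOURCE A (Python) =====
-- from typing import Any, Dict
--
-- def dict_with_lowerkey(d_in: Dict[str, Any]) -> Dict[str, Any]:
--     ret: Dict[str, Any] = {}
--     for k, v in d_in.items():
--         lk = k.lower()
--         if lk in ret:
--             raise RuntimeError(f"ERROR: parameter {lk} is duplicated")
--         else:
--             ret[k.lower()] = v
--     return ret
-- ===== SOURCE B (Python) =====
-- def dict_with_lowerkey(d_in):
--     ret = {k.lower(): v for k, v in d_in.items()}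
--     if len(ret) == len(d_in):
--         return ret
--     seen = set()
--     for k in d_in:
--         lk = k.lower()
--         if lk in seen:
--             raise RuntimeError(f"ERROR: parameter {lk} is duplicated")
--         seen.add(lk)
-- ===== Notes on version B (the rewrite author's own statement) =====
-- stated objective: alternative
-- what changed: Builds the lowercased dict in one shot with a comprehension and detects duplicates by comparing cardinalities, locating the offending key in a separate recovery scan only when the sizes differ, instead of A's interleaved build-and-check loop.
import Mathlib
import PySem

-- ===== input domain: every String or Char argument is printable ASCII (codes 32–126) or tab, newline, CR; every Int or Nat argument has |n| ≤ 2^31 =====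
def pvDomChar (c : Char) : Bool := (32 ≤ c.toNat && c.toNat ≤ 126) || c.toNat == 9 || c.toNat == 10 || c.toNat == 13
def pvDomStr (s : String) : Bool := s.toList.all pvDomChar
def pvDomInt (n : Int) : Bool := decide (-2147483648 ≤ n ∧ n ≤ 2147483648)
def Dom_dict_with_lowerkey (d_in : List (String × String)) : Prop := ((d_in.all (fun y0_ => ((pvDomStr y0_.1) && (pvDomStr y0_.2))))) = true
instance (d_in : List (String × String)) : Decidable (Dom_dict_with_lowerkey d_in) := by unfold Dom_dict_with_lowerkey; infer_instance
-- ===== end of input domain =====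

-- B builds the lowercased dict in one shot and validates by cardinality instead of A's
-- interleaved build-and-check loop; return values agree on Pre_ (no lowercase-key collisions).

-- ===== PORT A =====
-- A's loop: insert k.lower() one by one, raising (none) when the lowered key is already present.
def pvGoA : List (String × String) → PySem.Dict String String → Option (PySem.Dict String String)
  | [], ret => some ret
  | (k, v) :: rest, ret =>
    let lk := PySem.Str.lower k
    if ret.contains lk then none
    else pvGoA rest (ret.insert lk v)

def dict_with_lowerkey (d_in : List (String × String)) : List (String × String) :=
  ((pvGoA d_in PySem.Dict.empty).map (fun d => d.items)).getD []

-- ===== PORT B =====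
def dict_with_lowerkey_alt (d_in : List (String × String)) : List (String × String) :=
  let ret := PySem.Dict.ofList (d_in.map (fun p => (PySem.Str.lower p.1, p.2)))
  if ret.size == d_in.length then ret.items else []   -- 'else' = B's recovery scan, which raises

-- ===== PRECONDITION & SPEC =====
-- Pre_ excludes inputs on which two keys collapse to the same lowercase string (A raises
-- RuntimeError there, and so does B); it also excludes literally duplicated keys, which a
-- Python dict cannot contain.
def Pre_dict_with_lowerkey (d_in : List (String × String)) : Prop :=
  (d_in.map (fun p => PySem.Str.lower p.1)).Nodup
instance (d_in : List (String × String)) : Decidable (Pre_dict_with_lowerkey d_in) := by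
  unfold Pre_dict_with_lowerkey; infer_instance

def pvWitness_dict_with_lowerkey : (List (String × String)) := [("Alpha", "1"), ("beta", "2")]

def Spec_dict_with_lowerkey (d_in : List (String × String)) (out : List (String × String)) : Prop := out = dict_with_lowerkey_alt d_in
instance (d_in : List (String × String)) (out : List (String × String)) : Decidable (Spec_dict_with_lowerkey d_in out) := by unfold Spec_dict_with_lowerkey; infer_instance

-- ===== CLAIM (what is proved, stated in full; the proofs are below) =====
def Claim_equal_dict_with_lowerkey : Prop := ∀ (d_in : List (String × String)), Dom_dict_with_lowerkey d_in → Pre_dict_with_lowerkey d_in → Spec_dict_with_lowerkey d_in (dict_with_lowerkey d_in)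

-- ===== LEMMAS AND PROOFS =====

-- A's loop succeeds on fresh, pairwise-distinct lowered keys and is the insert fold.
theorem pvGoA_some (l : List (String × String)) :
    ∀ (d : PySem.Dict String String),
    (l.map (fun p => PySem.Str.lower p.1)).Nodup →
    (∀ p ∈ l, d.contains (PySem.Str.lower p.1) = false) →
    pvGoA l d = some (l.foldl (fun d p => d.insert (PySem.Str.lower p.1) p.2) d) := by
  induction l with
  | nil => intro d _ _; rfl
  | cons hd tl ih =>
    intro d hnd hfresh
    simp only [List.map_cons, List.nodup_cons] at hnd
    have hc : d.contains (PySem.Str.lower hd.1) = false := hfresh hd (by simp)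
    obtain ⟨k, v⟩ := hd
    simp only [pvGoA, hc, if_neg, Bool.false_eq_true, not_false_eq_true, List.foldl_cons]
    apply ih
    · exact hnd.2
    · intro p hp
      rw [PySem.Dict.contains_insert]
      have hne : PySem.Str.lower p.1 ≠ PySem.Str.lower k := by
        intro h
        exact hnd.1 (h ▸ (List.mem_map_of_mem hp))
      simp [hne, hfresh p (List.mem_cons_of_mem _ hp)]

theorem items_fold (l : List (String × String)) (h : (l.map (fun p => PySem.Str.lower p.1)).Nodup) :
    (l.foldl (fun d p => d.insert (PySem.Str.lower p.1) p.2) PySem.Dict.empty).items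
      = l.map (fun p => (PySem.Str.lower p.1, p.2)) := by
  have := PySem.Dict.items_foldl_insert_fresh (l := l)
    (k := fun p => PySem.Str.lower p.1) (v := fun p => p.2)
    (d := PySem.Dict.empty) (by intro a _; simp) h
  simpa using this

theorem ofList_map_eq_fold (l : List (String × String)) :
    PySem.Dict.ofList (l.map (fun p => (PySem.Str.lower p.1, p.2)))
      = l.foldl (fun d p => d.insert (PySem.Str.lower p.1) p.2) PySem.Dict.empty := by
  simp [PySem.Dict.ofList, PySem.Dict.update, List.foldl_map]

-- ===== VERDICT (by name: the statement is the Claim_ definition above) =====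
theorem dict_with_lowerkey_spec : Claim_equal_dict_with_lowerkey := by
  intro d_in _ hpre
  unfold Spec_dict_with_lowerkey dict_with_lowerkey dict_with_lowerkey_alt
  rw [pvGoA_some d_in PySem.Dict.empty hpre (by intro p _; simp)]
  rw [ofList_map_eq_fold]
  have hitems := items_fold d_in hpre
  have hsize : (d_in.foldl (fun d p => d.insert (PySem.Str.lower p.1) p.2) PySem.Dict.empty).size
      = d_in.length := by
    simp [PySem.Dict.size, hitems]
  simp [hsize, hitems]
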